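-- pv_equiv track=rewrite | github.com/GaoJianxiang/2017A2CS | CH25/Recursion1.py | countHi2
-- ===== SOURCE A (Python) =====
-- def countHi2(n):
--     if len(n)==0:
--         return 0
--     if n[0:2]=='hi':
--         return 1+countHi2(n[2:])
--     if n[1:3]=='hi' and n[0]=='x':
--         return 0+countHi2(n[3:])
--     return 0 + countHi2(n[1:])
-- ===== SOURCE B (Python) =====
-- def countHi2(n):
--     count = 0
--     i = 0
--     L = len(n)
--     while i < L:
--         if n[i] == 'h' and i + 1 < L and n[i + 1] == 'i':
--             count += 1
--             i += 2
--         elif n[i] == 'x' and i + 2 < L and n[i + 1] == 'h' and n[i + 2] == 'i':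
--             i += 3
--         else:
--             i += 1
--     return count
-- ===== Notes on version B (the rewrite author's own statement) =====
-- stated objective: faster
-- what changed: Replaced the O(n^2) slicing recursion with a single iterative index-based scan that keeps a running count and advances the index by 1, 2 or 3 according to the same branch logic.
import Mathlib
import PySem

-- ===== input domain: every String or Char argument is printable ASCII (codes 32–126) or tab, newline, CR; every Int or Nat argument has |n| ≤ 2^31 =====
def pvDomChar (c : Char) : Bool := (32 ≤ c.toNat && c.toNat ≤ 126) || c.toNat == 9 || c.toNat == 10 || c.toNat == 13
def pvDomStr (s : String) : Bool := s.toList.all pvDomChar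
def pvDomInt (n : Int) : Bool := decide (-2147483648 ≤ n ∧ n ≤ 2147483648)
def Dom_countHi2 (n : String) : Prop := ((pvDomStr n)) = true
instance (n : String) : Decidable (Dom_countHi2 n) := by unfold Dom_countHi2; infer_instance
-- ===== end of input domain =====

-- B replaces A's O(n^2) slicing recursion by a single iterative index-based scan (same branch logic, index advances by 1, 2 or 3).

-- ===== PORT A =====
-- A's recursion over string slices, transliterated over the character list
-- (n[0:2] = take 2, n[2:] = drop 2, n[1:3] = (drop 1).take 2, n[0] = element 0).
def fA (cs : List Char) : Int :=
  if cs.length = 0 then 0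
  else if cs.take 2 = ['h', 'i'] then 1 + fA (cs.drop 2)
  else if (cs.drop 1).take 2 = ['h', 'i'] ∧ cs[0]? = some 'x' then 0 + fA (cs.drop 3)
  else 0 + fA (cs.drop 1)
termination_by cs.length
decreasing_by all_goals (simp only [List.length_drop]; omega)

def countHi2 (n : String) : Int := fA n.toList

-- ===== PORT B =====
-- B's while-loop: index i and running count over the fixed character list.
def loopB (cs : List Char) (i : Nat) (count : Int) : Int :=
  if i < cs.length then
    if cs[i]? = some 'h' ∧ i + 1 < cs.length ∧ cs[i + 1]? = some 'i' then
      loopB cs (i + 2) (count + 1)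
    else if cs[i]? = some 'x' ∧ i + 2 < cs.length ∧ cs[i + 1]? = some 'h' ∧ cs[i + 2]? = some 'i' then
      loopB cs (i + 3) count
    else
      loopB cs (i + 1) count
  else count
termination_by cs.length - i
decreasing_by all_goals omega

def countHi2_alt (n : String) : Int := loopB n.toList 0 0

-- ===== PRECONDITION & SPEC =====
def Spec_countHi2 (n : String) (out : Int) : Prop := out = countHi2_alt n
instance (n : String) (out : Int) : Decidable (Spec_countHi2 n out) := by unfold Spec_countHi2; infer_instance

-- ===== CLAIM (what is proved, stated in full; the proofs are below) =====
def Claim_equal_countHi2 : Prop := ∀ (n : String), Dom_countHi2 n → Spec_countHi2 n (countHi2 n)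

-- ===== LEMMAS AND PROOFS =====
theorem take_two_eq (d : List Char) (a b : Char) :
    d.take 2 = [a, b] ↔ d[0]? = some a ∧ d[1]? = some b := by
  match d with
  | [] => simp
  | [x] => simp
  | x :: y :: t => simp [List.take]

theorem loopB_eq_fA (cs : List Char) :
    ∀ (k i : Nat) (count : Int), cs.length - i ≤ k →
      loopB cs i count = count + fA (cs.drop i) := by
  intro k
  induction k with
  | zero =>
    intro i count h
    have hi : ¬ i < cs.length := by omega
    have hd : cs.drop i = [] := List.drop_eq_nil_of_le (by omega)
    rw [loopB, if_neg hi, hd, fA]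
    simp
  | succ k ih =>
    intro i count h
    by_cases hi : i < cs.length
    · have hdrop : ∀ j : Nat, (cs.drop i).drop j = cs.drop (i + j) := by
        intro j; rw [List.drop_drop]
      have hget : ∀ j : Nat, (cs.drop i)[j]? = cs[i + j]? := by
        intro j; rw [List.getElem?_drop]
      have hlen : (cs.drop i).length = cs.length - i := List.length_drop ..
      have hne : ¬ (cs.drop i).length = 0 := by omega
      by_cases h1 : cs[i]? = some 'h' ∧ i + 1 < cs.length ∧ cs[i + 1]? = some 'i'
      · have ht : (cs.drop i).take 2 = ['h', 'i'] := by
          rw [take_two_eq, hget 0, hget 1]; exact ⟨by simpa using h1.1, h1.2.2⟩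
        rw [loopB, if_pos hi, if_pos h1, fA, if_neg hne, if_pos ht,
            ih (i + 2) (count + 1) (by omega), hdrop 2]
        ring
      · have ht : ¬ (cs.drop i).take 2 = ['h', 'i'] := by
          rw [take_two_eq, hget 0, hget 1]
          intro ⟨ha, hb⟩
          exact h1 ⟨by simpa using ha, (List.getElem?_eq_some_iff.mp hb).1, hb⟩
        by_cases h2 : cs[i]? = some 'x' ∧ i + 2 < cs.length ∧ cs[i + 1]? = some 'h' ∧ cs[i + 2]? = some 'i'
        · have ht2 : ((cs.drop i).drop 1).take 2 = ['h', 'i'] ∧ (cs.drop i)[0]? = some 'x' := by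
            rw [hdrop 1, take_two_eq, List.getElem?_drop, List.getElem?_drop, hget 0]
            refine ⟨⟨?_, ?_⟩, by simpa using h2.1⟩
            · show cs[i + 1 + 0]? = some 'h'
              simpa using h2.2.2.1
            · show cs[i + 1 + 1]? = some 'i'
              have he : i + 1 + 1 = i + 2 := by omega
              rw [he]; exact h2.2.2.2
          rw [loopB, if_pos hi, if_neg h1, if_pos h2, fA, if_neg hne, if_neg ht, if_pos ht2,
              ih (i + 3) count (by omega), hdrop 3]
          ring
        · have ht2 : ¬ (((cs.drop i).drop 1).take 2 = ['h', 'i'] ∧ (cs.drop i)[0]? = some 'x') := by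
            rw [hdrop 1, take_two_eq, List.getElem?_drop, List.getElem?_drop, hget 0]
            intro ⟨⟨ha, hb⟩, hc⟩
            apply h2
            have he : i + 1 + 1 = i + 2 := by omega
            rw [he] at hb
            exact ⟨by simpa using hc, (List.getElem?_eq_some_iff.mp hb).1, by simpa using ha, hb⟩
          rw [loopB, if_pos hi, if_neg h1, if_neg h2, fA, if_neg hne, if_neg ht, if_neg ht2,
              ih (i + 1) count (by omega), hdrop 1]
          ring
    · have hd : cs.drop i = [] := List.drop_eq_nil_of_le (by omega)
      rw [loopB, if_neg hi, hd, fA]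
      simp

theorem countHi2_spec : Claim_equal_countHi2 := by
  intro n _
  unfold Spec_countHi2 countHi2 countHi2_alt
  rw [loopB_eq_fA n.toList n.toList.length 0 0 (by omega)]
  simp
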